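-- pv_equiv track=rewrite | github.com/DamianPiuselli/algo2 | 02_recursion/ej6_resta_lista_iterativa.py | resta_pila_iterativa
-- ===== SOURCE A (Python) =====
-- def resta_pila_iterativa(xs: list[int]) -> int:
--     pila: list = []
--     for x in xs:
--         pila.append(x)
--
--     acumulador: int = 0
--     while pila != []:
--         acumulador = pila.pop() - acumulador
--
--     return acumulador
-- ===== SOURCE B (Python) =====
-- def resta_pila_iterativa(xs: list[int]) -> int:
--     total = 0
--     for i, x in enumerate(xs):
--         total += x if i % 2 == 0 else -x
--     return total
-- ===== Notes on version B (the rewrite author's own statement) =====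
-- stated objective: simpler
-- what changed: Replaces the stack copy plus back-to-front pop/subtract loop with a single forward pass that adds each element at an even index and subtracts it at an odd index into a plain running total.
import Mathlib
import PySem

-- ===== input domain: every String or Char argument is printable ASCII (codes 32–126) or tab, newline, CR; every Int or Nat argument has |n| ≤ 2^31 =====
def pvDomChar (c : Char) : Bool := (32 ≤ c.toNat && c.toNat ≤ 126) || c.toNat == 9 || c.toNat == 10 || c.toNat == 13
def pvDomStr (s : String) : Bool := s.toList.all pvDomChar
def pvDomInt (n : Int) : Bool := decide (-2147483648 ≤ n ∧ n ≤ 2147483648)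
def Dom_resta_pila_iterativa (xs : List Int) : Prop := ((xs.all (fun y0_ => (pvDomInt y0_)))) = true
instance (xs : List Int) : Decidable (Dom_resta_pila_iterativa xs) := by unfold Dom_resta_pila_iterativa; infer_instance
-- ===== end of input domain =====

-- B replaces A's stack copy and back-to-front pop/subtract loop by a single forward
-- pass adding even-indexed and subtracting odd-indexed elements (objective: simpler).

-- ===== PORT A =====
-- the while loop pops the LAST element of pila each round; popping the last element
-- of l is consuming l.reverse head-first, which this recursion does step for step
def pvPopLoop : List Int → Int → Int
  | [], acc => acc
  | x :: rest, acc => pvPopLoop rest (x - acc)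

def resta_pila_iterativa (xs : List Int) : Int :=
  let pila : List Int := xs.foldl (fun p x => p ++ [x]) []
  pvPopLoop pila.reverse 0

-- ===== PORT B =====
def resta_pila_iterativa_alt (xs : List Int) : Int :=
  (PySem.List.enumerate xs).foldl
    (fun total p => total + (if PySem.Int.mod p.1 2 == 0 then p.2 else -p.2)) 0

-- ===== PRECONDITION & SPEC =====
def Spec_resta_pila_iterativa (xs : List Int) (out : Int) : Prop := out = resta_pila_iterativa_alt xs
instance (xs : List Int) (out : Int) : Decidable (Spec_resta_pila_iterativa xs out) := by unfold Spec_resta_pila_iterativa; infer_instance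

-- ===== CLAIM (what is proved, stated in full; the proofs are below) =====
def Claim_equal_resta_pila_iterativa : Prop := ∀ (xs : List Int), Dom_resta_pila_iterativa xs → Spec_resta_pila_iterativa xs (resta_pila_iterativa xs)

-- ===== LEMMAS AND PROOFS =====

-- the populate loop just rebuilds xs
theorem pv_foldl_append (xs acc : List Int) :
    xs.foldl (fun p x => p ++ [x]) acc = acc ++ xs := by
  induction xs generalizing acc with
  | nil => simp
  | cons x xs ih => simp [List.foldl, ih]

-- A's pop loop is a foldl of subtraction
theorem pvPopLoop_eq_foldl (l : List Int) (acc : Int) :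
    pvPopLoop l acc = l.foldl (fun a x => x - a) acc := by
  induction l generalizing acc with
  | nil => rfl
  | cons x rest ih => simp [pvPopLoop, List.foldl, ih]

-- B's enumerate fold, generalized over the start index and running total
theorem pv_alt_general (xs : List Int) (s t : Int) :
    (PySem.List.enumerate xs s).foldl
      (fun total p => total + (if PySem.Int.mod p.1 2 == 0 then p.2 else -p.2)) t
    = t + (if s % 2 = 0 then xs.foldr (fun x a => x - a) 0
           else -(xs.foldr (fun x a => x - a) 0)) := by
  induction xs generalizing s t with
  | nil => simp
  | cons x xs ih =>
    rw [PySem.List.enumerate_cons, List.foldl_cons, ih]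
    have hm : PySem.Int.mod s 2 = s % 2 := PySem.Int.mod_eq_emod_of_pos (by norm_num)
    have h2 : (s + 1) % 2 = 0 ↔ ¬ (s % 2 = 0) := by omega
    rw [hm]
    by_cases h : s % 2 = 0 <;>
      simp [h, h2.mpr, h2, List.foldr] <;> ring

-- ===== VERDICT (by name: the statement is the Claim_ definition above) =====
theorem resta_pila_iterativa_spec : Claim_equal_resta_pila_iterativa := by
  intro xs _
  unfold Spec_resta_pila_iterativa resta_pila_iterativa resta_pila_iterativa_alt
  rw [pv_foldl_append, List.nil_append, pvPopLoop_eq_foldl, List.foldl_reverse,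
    pv_alt_general]
  simp
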